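-- pv_equiv track=rewrite | github.com/qe-team/marmot | marmot/util/extract_syntactic_features.py | get_connection_features
-- ===== SOURCE A (Python) =====
-- def get_connection_features(dependencies, token_pos, language=None):
--     # clauses inventory
--     clauses_en = ['advcl', 'ccomp', 'pcomp', 'rcmod']
--     clauses_de = ['neb', 'objc', 'par', 'rel']
--     if language == 'en':
--         clauses = clauses_en
--     elif language == 'de':
--         clauses = clauses_de
--     else:
--         clauses = clauses_en + clauses_de
--     # subjects inventory
--     subject = ['nsubj', 'nsubjpass', 'subj']
--     verbs = 'V'
--     # number of subjects, number of verbs with dependent subject, number of dependent clauses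
--     n_subj, n_verb_subj, n_clauses = 0, 0, 0
--     for head in dependencies:
--         for dep in dependencies[head]:
--             if dep['type'] in clauses:
--                 n_clauses += 1
--             if dep['type'] in subject:
--                 n_subj += 1
--                 if token_pos[head].startswith(verbs):
--                     n_verb_subj += 1
--     return [n_subj, n_verb_subj, n_clauses]
-- ===== SOURCE B (Python) =====
-- def get_connection_features(dependencies, token_pos, language=None):
--     # tabulate-then-query: one pass builds a count table of dependency types and
--     # the list of heads of subject edges; the three features are sums over the table.
--     clauses = {'en': ['advcl', 'ccomp', 'pcomp', 'rcmod'],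
--                'de': ['neb', 'objc', 'par', 'rel']}.get(
--               language, ['advcl', 'ccomp', 'pcomp', 'rcmod', 'neb', 'objc', 'par', 'rel'])
--     subject = {'nsubj', 'nsubjpass', 'subj'}
--     counts = {}
--     subj_heads = []
--     for head, deps in dependencies.items():
--         for dep in deps:
--             t = dep['type']
--             counts[t] = counts.get(t, 0) + 1
--             if t in subject:
--                 subj_heads.append(head)
--     n_subj = sum(counts.get(c, 0) for c in subject)
--     n_clauses = sum(counts.get(c, 0) for c in clauses)
--     n_verb_subj = sum(1 for h in subj_heads if token_pos[h].startswith('V'))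
--     return [n_subj, n_verb_subj, n_clauses]
-- ===== Notes on version B (the rewrite author's own statement) =====
-- stated objective: alternative
-- what changed: A counts the three features with a branch cascade inside the edge loop; B makes one tabulating pass that builds a count table of dependency types and a list of subject heads, then derives n_subj and n_clauses by summing the table over the subject/clause key sets and n_verb_subj by filtering the collected heads.
import Mathlib
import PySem

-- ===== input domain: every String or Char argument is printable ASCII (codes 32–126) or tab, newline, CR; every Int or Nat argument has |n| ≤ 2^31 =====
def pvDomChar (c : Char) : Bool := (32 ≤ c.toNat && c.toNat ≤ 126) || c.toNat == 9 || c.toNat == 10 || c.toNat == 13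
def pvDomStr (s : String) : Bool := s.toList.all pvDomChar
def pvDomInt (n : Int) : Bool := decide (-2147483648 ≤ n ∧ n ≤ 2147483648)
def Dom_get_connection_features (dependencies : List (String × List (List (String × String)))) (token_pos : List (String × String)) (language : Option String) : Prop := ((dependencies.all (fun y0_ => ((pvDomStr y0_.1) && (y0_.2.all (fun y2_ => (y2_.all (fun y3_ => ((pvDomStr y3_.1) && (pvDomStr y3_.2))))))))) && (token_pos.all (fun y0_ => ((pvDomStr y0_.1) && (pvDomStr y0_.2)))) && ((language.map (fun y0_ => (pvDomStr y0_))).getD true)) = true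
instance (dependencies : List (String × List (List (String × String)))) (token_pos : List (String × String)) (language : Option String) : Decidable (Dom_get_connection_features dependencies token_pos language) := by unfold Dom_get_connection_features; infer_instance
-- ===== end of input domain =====

-- B replaces A's per-edge branch cascade by one tabulating pass (a count table of dependency
-- types plus the list of subject heads) whose three features are read off by summing afterwards;
-- same cost, a different structure (objective: alternative).


-- ===== PORT A =====
def get_connection_features (dependencies : List (String × List (List (String × String)))) (token_pos : List (String × String)) (language : Option String) : List Int :=
  let clauses_en := ["advcl", "ccomp", "pcomp", "rcmod"]
  let clauses_de := ["neb", "objc", "par", "rel"]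
  let clauses := if language = some "en" then clauses_en
    else if language = some "de" then clauses_de
    else clauses_en ++ clauses_de
  let subject := ["nsubj", "nsubjpass", "subj"]
  let res := dependencies.foldl (fun (acc : Int × Int × Int) kv =>
      (((PySem.Dict.mk dependencies).get? kv.1).getD []).foldl (fun (acc : Int × Int × Int) dep =>
        let t := ((PySem.Dict.mk dep).get? "type").getD ""
        let acc := if t ∈ clauses then (acc.1, acc.2.1, acc.2.2 + 1) else acc
        if t ∈ subject then
          (acc.1 + 1,
           (if PySem.Str.startswith (((PySem.Dict.mk token_pos).get? kv.1).getD "") "V" then acc.2.1 + 1 else acc.2.1),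
           acc.2.2)
        else acc) acc)
    ((0 : Int), (0 : Int), (0 : Int))
  [res.1, res.2.1, res.2.2]

-- ===== PORT B =====
def get_connection_features_alt (dependencies : List (String × List (List (String × String)))) (token_pos : List (String × String)) (language : Option String) : List Int :=
  let clauses := (PySem.Dict.mk [(some "en", ["advcl", "ccomp", "pcomp", "rcmod"]), (some "de", ["neb", "objc", "par", "rel"])]).getD language ["advcl", "ccomp", "pcomp", "rcmod", "neb", "objc", "par", "rel"]
  let subject := PySem.Set.ofList ["nsubj", "nsubjpass", "subj"]
  let st := dependencies.foldl (fun (st : PySem.Dict String Int × List String) kv =>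
      kv.2.foldl (fun (st : PySem.Dict String Int × List String) dep =>
        let t := ((PySem.Dict.mk dep).get? "type").getD ""
        (st.1.modify t 0 (· + 1), if PySem.Set.contains subject t then st.2 ++ [kv.1] else st.2)) st)
    (PySem.Dict.empty, ([] : List String))
  let n_subj := subject.foldl (fun (s : Int) c => s + st.1.getD c 0) 0
  let n_clauses := clauses.foldl (fun (s : Int) c => s + st.1.getD c 0) 0
  let n_verb_subj : Int := (st.2.filter (fun h => PySem.Str.startswith (((PySem.Dict.mk token_pos).get? h).getD "") "V")).length
  [n_subj, n_verb_subj, n_clauses]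

-- ===== PRECONDITION & SPEC =====
-- Pre_ excludes inputs on which A raises KeyError (a dependency record without a 'type' key,
-- or a subject-type edge whose head is absent from token_pos), and it records that
-- `dependencies` stands for a Python dict, whose keys are necessarily distinct.
def Pre_get_connection_features (dependencies : List (String × List (List (String × String)))) (token_pos : List (String × String)) (language : Option String) : Prop :=
  (dependencies.map Prod.fst).Nodup ∧
  ∀ kv ∈ dependencies, ∀ dep ∈ kv.2,
    ((PySem.Dict.mk dep).get? "type").isSome = true ∧
    (((PySem.Dict.mk dep).get? "type").getD "" ∈ ["nsubj", "nsubjpass", "subj"] →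
      ((PySem.Dict.mk token_pos).get? kv.1).isSome = true)
instance (dependencies : List (String × List (List (String × String)))) (token_pos : List (String × String)) (language : Option String) : Decidable (Pre_get_connection_features dependencies token_pos language) := by unfold Pre_get_connection_features; infer_instance
def pvWitness_get_connection_features : (List (String × List (List (String × String)))) × (List (String × String)) × Option String :=
  ([("1", [[("type", "nsubj")], [("type", "advcl")]]), ("2", [[("type", "det")]])], [("1", "VBZ"), ("2", "NN")], none)

def Spec_get_connection_features (dependencies : List (String × List (List (String × String)))) (token_pos : List (String × String)) (language : Option String) (out : List Int) : Prop := out = get_connection_features_alt dependencies token_pos language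
instance (dependencies : List (String × List (List (String × String)))) (token_pos : List (String × String)) (language : Option String) (out : List Int) : Decidable (Spec_get_connection_features dependencies token_pos language out) := by unfold Spec_get_connection_features; infer_instance

-- ===== CLAIM (what is proved, stated in full; the proofs are below) =====
def Claim_equal_get_connection_features : Prop := ∀ (dependencies : List (String × List (List (String × String)))) (token_pos : List (String × String)) (language : Option String), Dom_get_connection_features dependencies token_pos language → Pre_get_connection_features dependencies token_pos language → Spec_get_connection_features dependencies token_pos language (get_connection_features dependencies token_pos language)

-- ===== LEMMAS AND PROOFS =====

-- proof-side abbreviations for the two programs' shared ingredients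
def pvT (dep : List (String × String)) : String := ((PySem.Dict.mk dep).get? "type").getD ""

def pvV (token_pos : List (String × String)) (h : String) : Bool :=
  PySem.Str.startswith (((PySem.Dict.mk token_pos).get? h).getD "") "V"

def pvEdges (dependencies : List (String × List (List (String × String)))) :
    List (String × List (String × String)) :=
  dependencies.flatMap (fun kv => kv.2.map (fun dep => (kv.1, dep)))

def pvClauses (language : Option String) : List String :=
  if language = some "en" then ["advcl", "ccomp", "pcomp", "rcmod"]
  else if language = some "de" then ["neb", "objc", "par", "rel"]
  else ["advcl", "ccomp", "pcomp", "rcmod", "neb", "objc", "par", "rel"]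

def pvStepA (token_pos : List (String × String)) (clauses : List String) :
    Int × Int × Int → String × List (String × String) → Int × Int × Int :=
  fun acc e =>
    let t := pvT e.2
    let acc := if t ∈ clauses then (acc.1, acc.2.1, acc.2.2 + 1) else acc
    if t ∈ ["nsubj", "nsubjpass", "subj"] then
      (acc.1 + 1, (if pvV token_pos e.1 then acc.2.1 + 1 else acc.2.1), acc.2.2)
    else acc

def pvStepB (subject : PySem.Set String) :
    PySem.Dict String Int × List String → String × List (String × String) →
    PySem.Dict String Int × List String :=
  fun st e =>
    let t := pvT e.2
    (st.1.modify t 0 (· + 1), if PySem.Set.contains subject t then st.2 ++ [e.1] else st.2)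

-- in a dict with distinct keys, looking a key up returns that pair's own value
lemma pv_lookup_self (l : List (String × List (List (String × String))))
    (hnd : (l.map Prod.fst).Nodup) :
    ∀ kv ∈ l, (PySem.Dict.mk l).get? kv.1 = some kv.2 := by
  induction l with
  | nil => intro kv h; cases h
  | cons hd tl ih =>
    intro kv hkv
    simp only [List.map_cons, List.nodup_cons] at hnd
    rw [PySem.Dict.get?_mk_cons]
    rcases List.mem_cons.mp hkv with h | h
    · subst h; simp
    · have hne : hd.1 ≠ kv.1 := by
        intro he; exact hnd.1 (he ▸ List.mem_map_of_mem h)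
      simp only [beq_eq_false_iff_ne.mpr hne, if_neg Bool.false_ne_true]
      exact ih hnd.2 kv h
    
-- a keyed nested fold over an association list is a fold over its edge list
lemma pv_foldl_flat {σ : Type} (f : σ → String × List (String × String) → σ)
    (deps : List (String × List (List (String × String)))) :
    ∀ init : σ,
      deps.foldl (fun acc kv => kv.2.foldl (fun acc dep => f acc (kv.1, dep)) acc) init =
        (pvEdges deps).foldl f init := by
  induction deps with
  | nil => intro init; rfl
  | cons kv tl ih =>
    intro init
    simp only [List.foldl_cons, pvEdges, List.flatMap_cons, List.foldl_append, List.foldl_map]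
    exact ih _

-- characterisation of A's accumulator loop
lemma pv_A_fold (token_pos : List (String × String)) (clauses : List String)
    (es : List (String × List (String × String))) :
    ∀ acc : Int × Int × Int,
      es.foldl (pvStepA token_pos clauses) acc =
        (acc.1 + (es.countP (fun e => decide (pvT e.2 ∈ ["nsubj", "nsubjpass", "subj"])) : Int),
         acc.2.1 + (es.countP (fun e => pvV token_pos e.1 && decide (pvT e.2 ∈ ["nsubj", "nsubjpass", "subj"])) : Int),
         acc.2.2 + (es.countP (fun e => decide (pvT e.2 ∈ clauses)) : Int)) := by
  induction es with
  | nil => intro acc; simp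
  | cons e es ih =>
    intro acc
    rw [List.foldl_cons, ih]
    simp only [List.countP_cons]
    by_cases h1 : pvT e.2 ∈ clauses <;>
      by_cases h2 : pvT e.2 ∈ ["nsubj", "nsubjpass", "subj"] <;>
      cases hv : pvV token_pos e.1 <;>
      (refine Prod.ext ?_ (Prod.ext ?_ ?_) <;>
        simp [pvStepA, h1, h2, hv] <;> omega)

-- characterisation of B's table-building loop
lemma pv_B_fold (subject : PySem.Set String)
    (es : List (String × List (String × String))) :
    ∀ (d : PySem.Dict String Int) (hs : List String),
      es.foldl (pvStepB subject) (d, hs) =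
        ((es.map (fun e => pvT e.2)).foldl (fun d x => d.modify x 0 (· + 1)) d,
         hs ++ (es.filter (fun e => PySem.Set.contains subject (pvT e.2))).map Prod.fst) := by
  induction es with
  | nil => intro d hs; simp
  | cons e es ih =>
    intro d hs
    rw [List.foldl_cons]
    simp only [pvStepB, List.map_cons, List.foldl_cons, List.filter_cons]
    cases hc : PySem.Set.contains subject (pvT e.2) <;>
      simp [ih]

-- counting membership in c :: K splits when c is not in K
lemma pv_countP_mem_cons (c : String) (K : List String) (h : c ∉ K) (ts : List String) :
    ts.countP (fun x => decide (x ∈ c :: K)) = ts.count c + ts.countP (fun x => decide (x ∈ K)) := by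
  induction ts with
  | nil => simp
  | cons x ts iht =>
    simp only [List.countP_cons, List.count_cons, iht]
    by_cases hx : x = c <;> by_cases hK : x ∈ K
    · exact absurd (hx ▸ hK) h
    · simp [hx, h]; omega
    · simp [hx, hK]; omega
    · simp [hx, hK]

-- summing a count table over a duplicate-free key list counts the members
lemma pv_sum_counts (ts : List String) :
    ∀ K : List String, K.Nodup → ∀ a : Int,
      K.foldl (fun s c => s + (ts.count c : Int)) a =
        a + (ts.countP (fun x => decide (x ∈ K)) : Int) := by
  intro K
  induction K with
  | nil => intro _ a; simp
  | cons c K ih =>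
    intro hnd a
    simp only [List.nodup_cons] at hnd
    rw [List.foldl_cons, ih hnd.2]
    rw [pv_countP_mem_cons c K hnd.1 ts]
    push_cast
    ring

-- B's literal language dict agrees with A's if-chain
lemma pv_B_clauses (language : Option String) :
    (PySem.Dict.mk [(some "en", ["advcl", "ccomp", "pcomp", "rcmod"]), (some "de", ["neb", "objc", "par", "rel"])]).getD language ["advcl", "ccomp", "pcomp", "rcmod", "neb", "objc", "par", "rel"]
      = pvClauses language := by
  rcases language with _ | s
  · simp [PySem.Dict.getD, PySem.Dict.get?, pvClauses]
  · by_cases h1 : s = "en"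
    · subst h1; simp [PySem.Dict.getD, PySem.Dict.get?_mk_cons, pvClauses]
    · by_cases h2 : s = "de"
      · subst h2; simp [PySem.Dict.getD, PySem.Dict.get?_mk_cons, pvClauses, h1]
      · have e1 : ((some "en" : Option String) == some s) = false :=
          beq_eq_false_iff_ne.mpr (fun hh => h1 (Option.some.inj hh).symm)
        have e2 : ((some "de" : Option String) == some s) = false :=
          beq_eq_false_iff_ne.mpr (fun hh => h2 (Option.some.inj hh).symm)
        simp [PySem.Dict.getD, PySem.Dict.get?, pvClauses, e1, e2, h1, h2]

lemma pv_clauses_nodup (language : Option String) : (pvClauses language).Nodup := by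
  unfold pvClauses; split_ifs <;> decide

-- A's value in tabulated normal form
lemma pv_A_norm (dependencies : List (String × List (List (String × String))))
    (token_pos : List (String × String)) (language : Option String)
    (hnd : (dependencies.map Prod.fst).Nodup) :
    get_connection_features dependencies token_pos language =
      [((pvEdges dependencies).countP (fun e => decide (pvT e.2 ∈ ["nsubj", "nsubjpass", "subj"])) : Int),
       ((pvEdges dependencies).countP (fun e => pvV token_pos e.1 && decide (pvT e.2 ∈ ["nsubj", "nsubjpass", "subj"])) : Int),
       ((pvEdges dependencies).countP (fun e => decide (pvT e.2 ∈ pvClauses language)) : Int)] := by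
  have hmem : ∀ (acc : Int × Int × Int), ∀ kv ∈ dependencies,
      (((PySem.Dict.mk dependencies).get? kv.1).getD []).foldl
          (fun acc dep => pvStepA token_pos (pvClauses language) acc (kv.1, dep)) acc
        = kv.2.foldl (fun acc dep => pvStepA token_pos (pvClauses language) acc (kv.1, dep)) acc := by
    intro acc kv hkv
    rw [pv_lookup_self dependencies hnd kv hkv]
    rfl
  show (let res := dependencies.foldl
          (fun (acc : Int × Int × Int) kv =>
            (((PySem.Dict.mk dependencies).get? kv.1).getD []).foldl
              (fun acc dep => pvStepA token_pos (pvClauses language) acc (kv.1, dep)) acc)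
          ((0 : Int), (0 : Int), (0 : Int))
        [res.1, res.2.1, res.2.2]) = _
  rw [PySem.List.foldl_congr_mem dependencies _
        (fun (acc : Int × Int × Int) kv =>
          kv.2.foldl (fun acc dep => pvStepA token_pos (pvClauses language) acc (kv.1, dep)) acc)
        ((0 : Int), (0 : Int), (0 : Int)) hmem,
      pv_foldl_flat (pvStepA token_pos (pvClauses language)) dependencies,
      pv_A_fold token_pos (pvClauses language) (pvEdges dependencies)]
  simp

-- B's value in the same normal form
lemma pv_B_norm (dependencies : List (String × List (List (String × String))))
    (token_pos : List (String × String)) (language : Option String) :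
    get_connection_features_alt dependencies token_pos language =
      [((pvEdges dependencies).countP (fun e => decide (pvT e.2 ∈ ["nsubj", "nsubjpass", "subj"])) : Int),
       ((pvEdges dependencies).countP (fun e => pvV token_pos e.1 && decide (pvT e.2 ∈ ["nsubj", "nsubjpass", "subj"])) : Int),
       ((pvEdges dependencies).countP (fun e => decide (pvT e.2 ∈ pvClauses language)) : Int)] := by
  have hofl : PySem.Set.ofList ["nsubj", "nsubjpass", "subj"] = ["nsubj", "nsubjpass", "subj"] := by
    decide
  show (let st := dependencies.foldl
          (fun (st : PySem.Dict String Int × List String) kv =>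
            kv.2.foldl (fun st dep =>
              pvStepB (PySem.Set.ofList ["nsubj", "nsubjpass", "subj"]) st (kv.1, dep)) st)
          (PySem.Dict.empty, ([] : List String))
        [ (PySem.Set.ofList ["nsubj", "nsubjpass", "subj"]).foldl (fun (s : Int) c => s + st.1.getD c 0) 0,
          ((st.2.filter (fun h => PySem.Str.startswith (((PySem.Dict.mk token_pos).get? h).getD "") "V")).length : Int),
          ((PySem.Dict.mk [(some "en", ["advcl", "ccomp", "pcomp", "rcmod"]), (some "de", ["neb", "objc", "par", "rel"])]).getD language ["advcl", "ccomp", "pcomp", "rcmod", "neb", "objc", "par", "rel"]).foldl (fun (s : Int) c => s + st.1.getD c 0) 0 ]) = _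
  rw [pv_foldl_flat (pvStepB (PySem.Set.ofList ["nsubj", "nsubjpass", "subj"])) dependencies,
      pv_B_fold (PySem.Set.ofList ["nsubj", "nsubjpass", "subj"]) (pvEdges dependencies)
        PySem.Dict.empty [], pv_B_clauses language]
  have hcount : ∀ c : String,
      (((pvEdges dependencies).map (fun e => pvT e.2)).foldl
          (fun d x => d.modify x 0 (· + 1)) PySem.Dict.empty).getD c 0
        = (((pvEdges dependencies).map (fun e => pvT e.2)).count c : Int) := by
    intro c
    rw [PySem.Dict.getD_foldl_modify_add_one]
    simp [PySem.Dict.getD, PySem.Dict.get?, PySem.Dict.empty]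
  have hsum : ∀ K : List String, K.Nodup →
      K.foldl (fun (s : Int) c =>
          s + ((((pvEdges dependencies).map (fun e => pvT e.2)).foldl
            (fun d x => d.modify x 0 (· + 1)) PySem.Dict.empty).getD c 0)) 0
        = ((pvEdges dependencies).countP (fun e => decide (pvT e.2 ∈ K)) : Int) := by
    intro K hK
    calc K.foldl (fun (s : Int) c =>
            s + ((((pvEdges dependencies).map (fun e => pvT e.2)).foldl
              (fun d x => d.modify x 0 (· + 1)) PySem.Dict.empty).getD c 0)) 0
        = K.foldl (fun (s : Int) c =>
            s + (((pvEdges dependencies).map (fun e => pvT e.2)).count c : Int)) 0 := by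
          refine PySem.List.foldl_congr_mem K _ _ 0 ?_
          intro s c _
          rw [hcount c]
      _ = 0 + (((pvEdges dependencies).map (fun e => pvT e.2)).countP
            (fun x => decide (x ∈ K)) : Int) := pv_sum_counts _ K hK 0
      _ = ((pvEdges dependencies).countP (fun e => decide (pvT e.2 ∈ K)) : Int) := by
          rw [List.countP_map, Int.zero_add]; rfl
  have hverb : (((((pvEdges dependencies).filter
        (fun e => PySem.Set.contains ["nsubj", "nsubjpass", "subj"] (pvT e.2))).map
          Prod.fst).filter
            (fun h => PySem.Str.startswith (((PySem.Dict.mk token_pos).get? h).getD "") "V")).length : Int)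
      = ((pvEdges dependencies).countP
          (fun e => pvV token_pos e.1 && decide (pvT e.2 ∈ ["nsubj", "nsubjpass", "subj"])) : Int) := by
    rw [← List.countP_eq_length_filter, List.countP_map, List.countP_filter]
    congr 1
    refine List.countP_congr ?_
    intro e _
    simp [pvV, PySem.Set.contains]
  dsimp only
  rw [hofl, List.nil_append, hsum ["nsubj", "nsubjpass", "subj"] (by decide),
    hsum (pvClauses language) (pv_clauses_nodup language), hverb]


-- ===== VERDICT (by name: the statement is the Claim_ definition above) =====
theorem get_connection_features_spec : Claim_equal_get_connection_features := by
  intro dependencies token_pos language _ hpre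
  unfold Spec_get_connection_features
  rw [pv_A_norm dependencies token_pos language hpre.1, pv_B_norm dependencies token_pos language]
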